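-- pv_equiv track=rewrite | github.com/rosasip/Python | names.py | airport_code_finder
-- ===== SOURCE A (Python) =====
-- def airport_code_finder(airport, city, method):
-- # Splits name of airports. takes up to the third letter.
--     if method == "name":
--         airportName = airport.split()
--         x1 = airportName[0]
--         x2 = airportName[1]
--         x3 = airportName[2]
-- # takes uppercase and others for lettering
--         number = 0
--         code = ""
--         for i in range(len(x1)):
--             if not x1[i].islower():
--                 number += 1
--                 code += x1[i]
--             if number == 2:
--                 b = i + 1
--                 code += x1[b]
--                 b = code.upper()
--                 return b
-- # puts first letters together to get acronym
--         word = x1[0] + x2[0] + x3[0]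
--         return word
-- # takes first three letters and makes it capital
--     elif method == "city":
--         letter = city.upper()
--         letter = letter[0:3]
--         return letter
-- ===== SOURCE B (Python) =====
-- LOWER = "abcdefghijklmnopqrstuvwxyz"
--
--
-- def airport_code_finder(airport, city, method):
--     if method == "name":
--         words = airport.split()
--         x1, x2, x3 = words[0], words[1], words[2]
--         # strip the (ASCII) lowercase prefix twice: t starts at the first
--         # non-lowercase character, u at the second
--         t = x1.lstrip(LOWER)
--         u = t[1:].lstrip(LOWER)
--         if t and u:
--             return (t[0] + u[0] + u[1]).upper()
--         return x1[0] + x2[0] + x3[0]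
--     elif method == "city":
--         return city[:3].upper()
-- ===== Notes on version B (the rewrite author's own statement) =====
-- stated objective: idiomatic
-- what changed: Replaces A's counter-and-accumulator character loop by two library lstrip calls with a lowercase-alphabet strip set: the first strip lands on the first non-lowercase character, a second strip of the remaining suffix lands on the second, and the code is read off by direct indexing; no loop, counter, index variable or accumulated string remains.
import Mathlib
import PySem

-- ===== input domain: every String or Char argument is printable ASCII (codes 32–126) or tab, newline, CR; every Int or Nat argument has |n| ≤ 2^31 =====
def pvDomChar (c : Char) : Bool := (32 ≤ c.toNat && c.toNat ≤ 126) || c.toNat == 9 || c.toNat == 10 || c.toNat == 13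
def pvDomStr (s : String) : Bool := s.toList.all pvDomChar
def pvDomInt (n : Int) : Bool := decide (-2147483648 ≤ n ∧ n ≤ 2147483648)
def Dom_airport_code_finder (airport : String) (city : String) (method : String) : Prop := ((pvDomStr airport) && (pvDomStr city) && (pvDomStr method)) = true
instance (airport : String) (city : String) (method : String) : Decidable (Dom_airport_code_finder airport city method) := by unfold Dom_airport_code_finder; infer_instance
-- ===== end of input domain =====

-- B replaces A's counter-and-accumulator character loop by two lstrip-with-lowercase-alphabet
-- calls (prefix stripping) plus direct indexing; objective: idiomatic, same cost.


-- ===== PORT A =====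
-- A's loop 'for i in range(len(x1))' with lookahead x1[i+1], as structural recursion over the
-- characters (x1[i] = head, x1[i+1] = head of rest; exact for the nonnegative in-range indices
-- the loop uses).  Result: none = IndexError (x1[i+1] out of range, outside Pre_),
-- some none = loop finished normally (fall through to the acronym), some (some code) = early return.
def acfLoopA (l : List Char) (number : Nat) (code : List Char) : Option (Option (List Char)) :=
  match l with
  | [] => some none
  | ch :: rest =>
    let number := if PySem.Chars.islower ch then number else number + 1
    let code := if PySem.Chars.islower ch then code else code ++ [ch]
    if number == 2 then
      match rest with
      | b :: _ => some (some (PySem.Chars.upper (code ++ [b])))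
      | [] => none            -- IndexError in Python, excluded by Pre_
    else acfLoopA rest number code

def airport_code_finder (airport : String) (city : String) (method : String) : Option String :=
  if method == "name" then
    let ws := PySem.Str.split₀ airport
    match ws[0]?, ws[1]?, ws[2]? with     -- nonneg indexing: [i]? exact (none = IndexError, outside Pre_)
    | some x1, some x2, some x3 =>
      match acfLoopA x1.toList 0 [] with
      | none => none          -- IndexError inside the loop, excluded by Pre_
      | some (some code) => some (String.ofList code)
      | some none =>
        -- acronym x1[0] + x2[0] + x3[0]
        match PySem.List.pyGet? x1.toList 0, PySem.List.pyGet? x2.toList 0, PySem.List.pyGet? x3.toList 0 with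
        | some a, some b, some c => some (String.ofList [a, b, c])
        | _, _, _ => none     -- unreachable: split words are nonempty
    | _, _, _ => none         -- IndexError, excluded by Pre_
  else if method == "city" then
    let letter := PySem.Chars.upper city.toList
    some (String.ofList (PySem.Chars.slice letter (some 0) (some 3)))
  else none

-- ===== PORT B =====
-- the module constant LOWER = "abcdefghijklmnopqrstuvwxyz"
def acfLOWER : List Char := "abcdefghijklmnopqrstuvwxyz".toList

-- s.lstrip(chars): remove the longest leading run of characters belonging to chars (exact)
def acfLstrip (chars : List Char) (l : List Char) : List Char :=
  l.dropWhile (fun c => chars.contains c)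

def airport_code_finder_alt (airport : String) (city : String) (method : String) : Option String :=
  if method == "name" then
    match PySem.Str.split₀ airport with   -- words[0], words[1], words[2] exist iff ≥ 3 words (IndexError otherwise, outside Pre_)
    | x1 :: x2 :: x3 :: _ =>
      let t := acfLstrip acfLOWER x1.toList
      let u := acfLstrip acfLOWER (t.drop 1)    -- t[1:] for the nonneg index 1 = drop 1 (exact)
      match t, u with                            -- 'if t and u': both nonempty
      | c1 :: _, c2 :: us =>
        match us with
        | u1 :: _ => some (String.ofList (PySem.Chars.upper [c1, c2, u1]))   -- (t[0]+u[0]+u[1]).upper()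
        | [] => none                             -- u[1] IndexError, excluded by Pre_
      | _, _ =>
        match x1.toList, x2.toList, x3.toList with
        | a :: _, b :: _, c :: _ => some (String.ofList [a, b, c])
        | _, _, _ => none                        -- unreachable: split words are nonempty
    | _ => none               -- IndexError, excluded by Pre_
  else if method == "city" then
    some (String.ofList (PySem.Chars.upper (PySem.List.slice city.toList none (some 3))))
  else none

-- ===== PRECONDITION & SPEC =====
-- positions of the non-lowercase characters of l (closed-form: a filter of the index range)
def acfCapIdx (l : List Char) : List Nat :=
  (List.range l.length).filter (fun i => !PySem.Chars.islower (l.getD i ' '))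

-- Pre_ excludes exactly the inputs where Python A raises IndexError: method "name" with fewer than
-- three whitespace-separated words, or a first word whose second non-lowercase character is its
-- last character (then x1[i+1] is out of range).  Both ports encode a raise as none and in fact
-- agree even there, so the equivalence proof below does not need Pre_; Pre_ still marks exactly
-- where the Python programs raise instead of returning.
def Pre_airport_code_finder (airport : String) (city : String) (method : String) : Prop :=
  method = "name" →
    3 ≤ (PySem.Str.split₀ airport).length ∧
    (2 ≤ (acfCapIdx ((PySem.Str.split₀ airport).headD "").toList).length →
      (acfCapIdx ((PySem.Str.split₀ airport).headD "").toList).getD 1 0 + 1 <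
        ((PySem.Str.split₀ airport).headD "").toList.length)
instance (airport : String) (city : String) (method : String) : Decidable (Pre_airport_code_finder airport city method) := by unfold Pre_airport_code_finder; infer_instance

def pvWitness_airport_code_finder : String × String × String := ("John F Kennedy", "New York", "name")

def Spec_airport_code_finder (airport : String) (city : String) (method : String) (out : Option String) : Prop := out = airport_code_finder_alt airport city method
instance (airport : String) (city : String) (method : String) (out : Option String) : Decidable (Spec_airport_code_finder airport city method out) := by unfold Spec_airport_code_finder; infer_instance

-- ===== CLAIM (what is proved, stated in full; the proofs are below) =====
def Claim_equal_airport_code_finder : Prop := ∀ (airport : String) (city : String) (method : String), Dom_airport_code_finder airport city method → Pre_airport_code_finder airport city method → Spec_airport_code_finder airport city method (airport_code_finder airport city method)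

-- ===== LEMMAS AND PROOFS =====

-- membership in the LOWER alphabet is exactly the islower test, character by character
theorem acf_mem_lower (c : Char) : (acfLOWER.contains c) = PySem.Chars.islower c := by
  have hL : acfLOWER = ['a','b','c','d','e','f','g','h','i','j','k','l','m','n','o','p','q','r','s','t','u','v','w','x','y','z'] := by rfl
  rw [hL]
  simp only [PySem.Chars.islower, List.contains_eq_mem]
  by_cases h : 'a' ≤ c ∧ c ≤ 'z'
  · have h1 : 97 ≤ c.toNat := h.1
    have h2 : c.toNat ≤ 122 := h.2
    simp only [h.1, h.2, decide_true, Bool.and_self, decide_eq_true_eq]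
    interval_cases hc : c.toNat <;>
      (have h0 := Char.ofNat_toNat c; rw [hc] at h0; rw [← h0]; decide)
  · have hnm : ¬ (c ∈ ['a','b','c','d','e','f','g','h','i','j','k','l','m','n','o','p','q','r','s','t','u','v','w','x','y','z']) := by
      intro hm
      apply h
      fin_cases hm <;> exact ⟨by decide, by decide⟩
    rw [not_and_or] at h
    rcases h with h | h <;> simp [hnm, h]

-- the two lstrip calls of B strip exactly the islower prefix
theorem acfLstrip_eq (l : List Char) :
    acfLstrip acfLOWER l = l.dropWhile PySem.Chars.islower := by
  have : (fun c => acfLOWER.contains c) = PySem.Chars.islower := funext acf_mem_lower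
  rw [acfLstrip, this]

-- A's loop from counter 0: it skips the lowercase prefix, records the first non-lowercase char
theorem acfLoopA_zero (l : List Char) (code : List Char) :
    acfLoopA l 0 code =
      match l.dropWhile PySem.Chars.islower with
      | [] => some none
      | c :: r => acfLoopA r 1 (code ++ [c]) := by
  induction l generalizing code with
  | nil => rfl
  | cons ch rest ih =>
    by_cases h : PySem.Chars.islower ch = true
    · simpa [acfLoopA, List.dropWhile, h] using ih code
    · simp [acfLoopA, List.dropWhile, h]

-- A's loop from counter 1: it skips the lowercase prefix, then returns code + the next two chars
theorem acfLoopA_one (l : List Char) (code : List Char) :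
    acfLoopA l 1 code =
      match l.dropWhile PySem.Chars.islower with
      | [] => some none
      | c :: r =>
        match r with
        | b :: _ => some (some (PySem.Chars.upper (code ++ [c, b])))
        | [] => none := by
  induction l generalizing code with
  | nil => rfl
  | cons ch rest ih =>
    by_cases h : PySem.Chars.islower ch = true
    · simpa [acfLoopA, List.dropWhile, h] using ih code
    · cases rest <;> simp [acfLoopA, List.dropWhile, h]

-- the two acronym fall-through expressions agree on every triple of words
theorem acf_acr_eq (l1 l2 l3 : List Char) :
    (match PySem.List.pyGet? l1 0, PySem.List.pyGet? l2 0, PySem.List.pyGet? l3 0 with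
      | some a, some b, some c => some (String.ofList [a, b, c])
      | _, _, _ => (none : Option String)) =
    (match l1, l2, l3 with
      | a :: _, b :: _, c :: _ => some (String.ofList [a, b, c])
      | _, _, _ => none) := by
  cases l1 <;> cases l2 <;> cases l3 <;> simp [PySem.List.pyGet?, PySem.List.pyIdx?]

-- ===== VERDICT (by name: the statement is the Claim_ definition above) =====
theorem airport_code_finder_spec : Claim_equal_airport_code_finder := by
  intro airport city method _ _
  unfold Spec_airport_code_finder airport_code_finder airport_code_finder_alt
  by_cases hm : method = "name"
  · subst hm
    simp only [beq_self_eq_true, if_pos]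
    cases hsp : PySem.Str.split₀ airport with
    | nil => simp
    | cons x1 ws1 =>
      cases ws1 with
      | nil => simp
      | cons x2 ws2 =>
        cases ws2 with
        | nil => simp
        | cons x3 ws3 =>
          simp only [List.getElem?_cons_zero, List.getElem?_cons_succ, acfLstrip_eq,
            acfLoopA_zero]
          cases h1 : x1.toList.dropWhile PySem.Chars.islower with
          | nil =>
            dsimp only
            rw [acf_acr_eq x1.toList x2.toList x3.toList]
          | cons c1 r =>
            dsimp only
            simp only [List.drop_succ_cons, List.drop_zero, acfLoopA_one]
            cases hr : r.dropWhile PySem.Chars.islower with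
            | nil =>
              dsimp only
              rw [acf_acr_eq x1.toList x2.toList x3.toList]
            | cons c2 us =>
              cases us <;> simp
  · have hm' : (method == "name") = false := by simpa using hm
    simp only [hm']
    by_cases hc : method = "city"
    · subst hc
      simp only [beq_self_eq_true, if_pos]
      have hS : ∀ l : List Char, PySem.List.slice l none (some 3) = l.take 3 := fun l => by
        rw [PySem.List.slice_to l (by norm_num)]; rfl
      simp [hS, PySem.Chars.upper, List.map_take]
    · have hc' : (method == "city") = false := by simpa using hc
      simp [hc']
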